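-- pv_equiv track=rewrite | github.com/frances-zhao/ICS207 | homework/lesson 21/lesson21_5.py | make_aa
-- ===== SOURCE A (Python) =====
-- def make_aa(word):
--     new_word = str()
--     for i in range(len(word)):
--         if "aA".find(word[i]) != -1:
--             new_word += word[i]+word[i]
--         else:
--             new_word += word[i]
--     return new_word
-- ===== SOURCE B (Python) =====
-- def make_aa(word):
--     return word.replace('a', 'aa').replace('A', 'AA')
-- ===== Notes on version B (the rewrite author's own statement) =====
-- stated objective: idiomatic
-- what changed: Replaces the index loop with quadratic string concatenation by two successive str.replace passes ('a'->'aa', then 'A'->'AA'), which commute since neither replacement introduces the other's target.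
import Mathlib
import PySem

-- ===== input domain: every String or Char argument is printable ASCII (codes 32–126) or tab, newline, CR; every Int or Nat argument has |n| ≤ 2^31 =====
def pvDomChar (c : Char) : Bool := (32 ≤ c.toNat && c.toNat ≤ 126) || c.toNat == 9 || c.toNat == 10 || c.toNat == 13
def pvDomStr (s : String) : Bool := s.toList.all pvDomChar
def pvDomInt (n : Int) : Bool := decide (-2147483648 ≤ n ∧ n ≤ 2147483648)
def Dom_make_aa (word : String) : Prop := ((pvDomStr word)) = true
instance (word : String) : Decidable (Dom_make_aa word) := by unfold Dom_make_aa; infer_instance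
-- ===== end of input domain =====

-- B doubles 'a'/'A' with two successive str.replace passes instead of A's index loop; objective: idiomatic.

-- ===== PORT A =====
-- index i of range(len(word)) is always in range, so pyGetD's default is never read
def make_aa (word : String) : String :=
  let cs := word.toList
  let newWord :=
    (PySem.List.pyRange 0 (PySem.Chars.len cs) 1).foldl
      (fun acc i =>
        if PySem.Chars.find ['a', 'A'] [PySem.List.pyGetD cs i ' '] ≠ -1 then
          acc ++ ([PySem.List.pyGetD cs i ' '] ++ [PySem.List.pyGetD cs i ' '])
        else
          acc ++ [PySem.List.pyGetD cs i ' ']) []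
  String.ofList newWord

-- ===== PORT B =====
def make_aa_alt (word : String) : String :=
  PySem.Str.replace (PySem.Str.replace word "a" "aa") "A" "AA"

-- ===== PRECONDITION & SPEC =====
def Spec_make_aa (word : String) (out : String) : Prop := out = make_aa_alt word
instance (word : String) (out : String) : Decidable (Spec_make_aa word out) := by unfold Spec_make_aa; infer_instance

-- ===== CLAIM (what is proved, stated in full; the proofs are below) =====
def Claim_equal_make_aa : Prop := ∀ (word : String), Dom_make_aa word → Spec_make_aa word (make_aa word)

-- ===== LEMMAS AND PROOFS =====

-- single-character needle: replace.go is exactly a character-wise expansion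
theorem replace_go_single (o : Char) (r : List Char) :
    ∀ (l : List Char) (fuel : Nat) (acc : List Char), l.length ≤ fuel →
      PySem.Chars.replace.go [o] r fuel l acc
        = acc.reverse ++ l.flatMap (fun c => if c = o then r else [c]) := by
  intro l
  induction l with
  | nil =>
    intro fuel acc _
    cases fuel <;> simp [PySem.Chars.replace.go]
  | cons c t ih =>
    intro fuel acc h
    cases fuel with
    | zero => simp at h
    | succ f =>
      by_cases hco : c = o
      · subst hco
        have hpre : [c].isPrefixOf (c :: t) = true := by simp [List.isPrefixOf]
        simp only [PySem.Chars.replace.go, hpre, if_pos]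
        rw [show List.drop [c].length (c :: t) = t from rfl, ih f (r.reverse ++ acc) (by simpa using Nat.le_of_succ_le_succ h)]
        simp
      · have hpre : [o].isPrefixOf (c :: t) = false := by
          simp [List.isPrefixOf]; exact fun h' => hco h'.symm
        simp only [PySem.Chars.replace.go, hpre]
        rw [ih f (c :: acc) (by simpa using Nat.le_of_succ_le_succ h)]
        simp [hco]

theorem replace_single (o : Char) (r cs : List Char) :
    PySem.Chars.replace cs [o] r = cs.flatMap (fun c => if c = o then r else [c]) := by
  simp only [PySem.Chars.replace, List.isEmpty_cons, Bool.false_eq_true, if_false]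
  exact replace_go_single o r cs cs.length [] (le_refl _)

-- the per-character bodies of A and of the composed double replace coincide
theorem body_eq (c : Char) :
    (if PySem.Chars.find ['a', 'A'] [c] ≠ -1 then [c] ++ [c] else [c])
      = ((if c = 'a' then ['a', 'a'] else [c]).flatMap
          (fun d => if d = 'A' then ['A', 'A'] else [d])) := by
  by_cases ha : c = 'a'
  · subst ha; simp [PySem.Chars.find_eq_neg_one_iff, List.singleton_infix_iff]
  · by_cases hA : c = 'A'
    · subst hA; simp [PySem.Chars.find_eq_neg_one_iff, List.singleton_infix_iff]
    · have : PySem.Chars.find ['a', 'A'] [c] = -1 := by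
        rw [PySem.Chars.find_eq_neg_one_iff, List.singleton_infix_iff]
        simp [ha, hA]
      simp [this, ha, hA]

-- ===== VERDICT (by name: the statement is the Claim_ definition above) =====
theorem make_aa_spec : Claim_equal_make_aa := by
  intro word _
  unfold Spec_make_aa make_aa make_aa_alt
  apply String.toList_inj.mp
  rw [PySem.Str.toList_replace, PySem.Str.toList_replace]
  simp only [String.toList_ofList]
  have hb : (fun (acc : List Char) (i : Int) =>
      if PySem.Chars.find ['a', 'A'] [PySem.List.pyGetD word.toList i ' '] ≠ -1 then
        acc ++ ([PySem.List.pyGetD word.toList i ' '] ++ [PySem.List.pyGetD word.toList i ' '])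
      else acc ++ [PySem.List.pyGetD word.toList i ' '])
      = (fun acc i => acc ++
          (if PySem.Chars.find ['a', 'A'] [PySem.List.pyGetD word.toList i ' '] ≠ -1 then
            [PySem.List.pyGetD word.toList i ' '] ++ [PySem.List.pyGetD word.toList i ' ']
          else [PySem.List.pyGetD word.toList i ' '])) := by
    funext acc i; split <;> rfl
  rw [hb, PySem.List.foldl_append_eq_flatMap, List.nil_append]
  have hmap := PySem.List.map_pyGetD_pyRange_zero word.toList ' '
  calc (PySem.List.pyRange 0 (PySem.Chars.len word.toList) 1).flatMap
          (fun i => if PySem.Chars.find ['a', 'A'] [PySem.List.pyGetD word.toList i ' '] ≠ -1 then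
            [PySem.List.pyGetD word.toList i ' '] ++ [PySem.List.pyGetD word.toList i ' ']
          else [PySem.List.pyGetD word.toList i ' '])
      = ((PySem.List.pyRange 0 (PySem.List.len word.toList) 1).map
            (fun i => PySem.List.pyGetD word.toList i ' ')).flatMap
          (fun c => if PySem.Chars.find ['a', 'A'] [c] ≠ -1 then [c] ++ [c] else [c]) := by
        rw [List.flatMap_map]; simp [PySem.Chars.len]
    _ = word.toList.flatMap
          (fun c => if PySem.Chars.find ['a', 'A'] [c] ≠ -1 then [c] ++ [c] else [c]) := by
        rw [hmap]
    _ = PySem.Chars.replace (PySem.Chars.replace word.toList "a".toList "aa".toList)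
          "A".toList "AA".toList := by
        have ha : "a".toList = ['a'] := rfl
        have haa : "aa".toList = ['a', 'a'] := rfl
        have hA : "A".toList = ['A'] := rfl
        have hAA : "AA".toList = ['A', 'A'] := rfl
        rw [ha, haa, hA, hAA, replace_single, replace_single, List.flatMap_assoc]
        exact List.flatMap_congr (fun c _ => body_eq c)
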